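-- pv_equiv track=rewrite | github.com/wxh09/Gaitset-code | model/network/GATnet.py | f
-- ===== SOURCE A (Python) =====
-- def f(i, Kernels, Paddings, Strides, pos):
-- 	if (i == len(Kernels)):
-- 		return pos, pos
--
-- 	pos1, pos2 = f(i + 1, Kernels, Paddings, Strides, pos)
-- 	k = Kernels[i]
-- 	p = Paddings[i]
-- 	s = Strides[i]
-- 	x1 = 0 - p + pos1[0] * s
-- 	y1 = 0 - p + pos1[1] * s
-- 	x2 = (k - 1) - p + pos2[0] * s
-- 	y2 = (k - 1) - p + pos2[1] * s
--
-- 	return [x1, y1], [x2, y2]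
-- ===== SOURCE B (Python) =====
-- def f(i, Kernels, Paddings, Strides, pos):
--     pos1, pos2 = pos, pos
--     for j in range(len(Kernels) - 1, i - 1, -1):
--         k, p, s = Kernels[j], Paddings[j], Strides[j]
--         pos1 = [pos1[0] * s - p, pos1[1] * s - p]
--         pos2 = [pos2[0] * s + (k - 1) - p, pos2[1] * s + (k - 1) - p]
--     return pos1, pos2
-- ===== Notes on version B (the rewrite author's own statement) =====
-- stated objective: alternative
-- what changed: Replaces the recursion (descend to the last layer, apply each layer's affine map while unwinding) with an iterative accumulator loop over j from len(Kernels)-1 down to i.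
import Mathlib
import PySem

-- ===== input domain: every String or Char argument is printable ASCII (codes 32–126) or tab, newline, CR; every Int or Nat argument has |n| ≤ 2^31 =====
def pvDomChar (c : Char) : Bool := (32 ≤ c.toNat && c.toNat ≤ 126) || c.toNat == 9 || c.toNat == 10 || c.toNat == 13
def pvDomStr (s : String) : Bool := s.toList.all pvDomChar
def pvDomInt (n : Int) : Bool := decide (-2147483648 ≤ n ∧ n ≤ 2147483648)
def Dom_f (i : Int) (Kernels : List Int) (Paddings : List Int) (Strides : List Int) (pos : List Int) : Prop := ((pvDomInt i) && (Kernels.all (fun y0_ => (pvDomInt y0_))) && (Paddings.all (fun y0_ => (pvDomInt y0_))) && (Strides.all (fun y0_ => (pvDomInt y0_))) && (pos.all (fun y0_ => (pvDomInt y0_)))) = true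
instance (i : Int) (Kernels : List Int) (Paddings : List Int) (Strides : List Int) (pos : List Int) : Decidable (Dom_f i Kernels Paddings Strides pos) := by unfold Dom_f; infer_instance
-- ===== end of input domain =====

-- B replaces A's recursive descent by an iterative countdown loop over the layer indices (alternative decomposition, same cost; return-value equivalence).


-- ===== PORT A =====
-- Fuel (K.length - i).toNat makes A's recursion structural; the fuel-0, i ≠ len branch is
-- unreachable inside Pre_f (for i > len the Python recurses without bound, RecursionError).
-- pyGetD _ _ 0 is exact under Pre_f (every index Python uses is in range there).
def fAux (fuel : Nat) (i : Int) (Kernels : List Int) (Paddings : List Int) (Strides : List Int) (pos : List Int) : List Int × List Int :=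
  if i = (Kernels.length : Int) then (pos, pos)
  else
    match fuel with
    | 0 => (pos, pos)
    | Nat.succ fuel =>
      let r := fAux fuel (i + 1) Kernels Paddings Strides pos
      let pos1 := r.1
      let pos2 := r.2
      let k := PySem.List.pyGetD Kernels i 0
      let p := PySem.List.pyGetD Paddings i 0
      let s := PySem.List.pyGetD Strides i 0
      let x1 := 0 - p + PySem.List.pyGetD pos1 0 0 * s
      let y1 := 0 - p + PySem.List.pyGetD pos1 1 0 * s
      let x2 := (k - 1) - p + PySem.List.pyGetD pos2 0 0 * s
      let y2 := (k - 1) - p + PySem.List.pyGetD pos2 1 0 * s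
      ([x1, y1], [x2, y2])

def f (i : Int) (Kernels : List Int) (Paddings : List Int) (Strides : List Int) (pos : List Int) : List Int × List Int :=
  fAux ((Kernels.length : Int) - i).toNat i Kernels Paddings Strides pos

-- ===== PORT B =====
-- 'for j in range(len(Kernels)-1, i-1, -1)' folding the two corner accumulators.
def f_alt (i : Int) (Kernels : List Int) (Paddings : List Int) (Strides : List Int) (pos : List Int) : List Int × List Int :=
  (PySem.List.pyRange ((Kernels.length : Int) - 1) (i - 1) (-1)).foldl
    (fun pr j =>
      let k := PySem.List.pyGetD Kernels j 0
      let p := PySem.List.pyGetD Paddings j 0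
      let s := PySem.List.pyGetD Strides j 0
      ([PySem.List.pyGetD pr.1 0 0 * s - p, PySem.List.pyGetD pr.1 1 0 * s - p],
       [PySem.List.pyGetD pr.2 0 0 * s + (k - 1) - p, PySem.List.pyGetD pr.2 1 0 * s + (k - 1) - p]))
    (pos, pos)

-- ===== PRECONDITION & SPEC =====
-- Pre_f is exactly where the Python A returns: it excludes i > len(Kernels) (A recurses
-- without bound, RecursionError) and, when at least one layer is applied (i < len), the
-- IndexErrors: i below -len(Kernels), Paddings/Strides shorter than Kernels, pos shorter than 2.
def Pre_f (i : Int) (Kernels : List Int) (Paddings : List Int) (Strides : List Int) (pos : List Int) : Prop :=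
  i ≤ (Kernels.length : Int) ∧
  (i < (Kernels.length : Int) →
    0 ≤ (Kernels.length : Int) + i ∧
    Kernels.length ≤ Paddings.length ∧ Kernels.length ≤ Strides.length ∧ 2 ≤ pos.length)
instance (i : Int) (Kernels : List Int) (Paddings : List Int) (Strides : List Int) (pos : List Int) : Decidable (Pre_f i Kernels Paddings Strides pos) := by unfold Pre_f; infer_instance

def pvWitness_f : Int × List Int × List Int × List Int × List Int := (1, [3, 5], [1, 0], [2, 1], [0, 0])

def Spec_f (i : Int) (Kernels : List Int) (Paddings : List Int) (Strides : List Int) (pos : List Int) (out : List Int × List Int) : Prop := out = f_alt i Kernels Paddings Strides pos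
instance (i : Int) (Kernels : List Int) (Paddings : List Int) (Strides : List Int) (pos : List Int) (out : List Int × List Int) : Decidable (Spec_f i Kernels Paddings Strides pos out) := by unfold Spec_f; infer_instance

-- ===== CLAIM (what is proved, stated in full; the proofs are below) =====
def Claim_equal_f : Prop := ∀ (i : Int) (Kernels : List Int) (Paddings : List Int) (Strides : List Int) (pos : List Int), Dom_f i Kernels Paddings Strides pos → Pre_f i Kernels Paddings Strides pos → Spec_f i Kernels Paddings Strides pos (f i Kernels Paddings Strides pos)

-- ===== LEMMAS AND PROOFS =====

-- B's countdown range, written as the reversed upward range (for ++-[last] induction).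
theorem pv_range_rev (a b : Int) :
    PySem.List.pyRange (b - 1) (a - 1) (-1) = (PySem.List.pyRange a b 1).reverse := by
  rw [PySem.List.pyRange_neg_one_eq_reverse]
  norm_num

-- A's recursion (with enough fuel) computes B's fold, for every i ≤ len(Kernels).
theorem pv_main (Kernels Paddings Strides pos : List Int) :
    ∀ (fuel : Nat) (i : Int), i ≤ (Kernels.length : Int) →
      ((Kernels.length : Int) - i).toNat ≤ fuel →
      fAux fuel i Kernels Paddings Strides pos = f_alt i Kernels Paddings Strides pos := by
  intro fuel
  induction fuel with
  | zero =>
    intro i hle hf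
    have : i = (Kernels.length : Int) := by omega
    subst this
    rw [fAux, if_pos rfl, f_alt, pv_range_rev, PySem.List.pyRange_one_eq_nil le_rfl]
    rfl
  | succ t ih =>
    intro i hle hf
    by_cases hi : i = (Kernels.length : Int)
    · subst hi
      rw [fAux, if_pos rfl, f_alt, pv_range_rev, PySem.List.pyRange_one_eq_nil le_rfl]
      rfl
    · have hlt : i < (Kernels.length : Int) := lt_of_le_of_ne hle hi
      rw [fAux]
      simp only [hi, if_false]
      rw [ih (i + 1) (by omega) (by omega)]
      unfold f_alt
      rw [pv_range_rev, pv_range_rev, PySem.List.pyRange_one_cons hlt,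
          List.reverse_cons, List.foldl_append]
      simp only [List.foldl_cons, List.foldl_nil]
      simp only [Prod.mk.injEq, List.cons.injEq, and_true]
      refine ⟨⟨by ring, by ring⟩, by ring, by ring⟩

-- ===== VERDICT (by name: the statement is the Claim_ definition above) =====
theorem f_spec : Claim_equal_f := by
  intro i Kernels Paddings Strides pos _ hpre
  exact pv_main Kernels Paddings Strides pos _ i hpre.1 le_rfl
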